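-- pv_equiv track=rewrite | github.com/Dachaes/algorithm | 01. 이것이 코딩 테스트다 - 나동빈/01. 그리디/02. 기출 문제/06-2. 무지의 먹방 라이브 (p. 316) - 효율성 실패.py | solution
-- ===== SOURCE A (Python) =====
-- def solution(food_times, k):
--     n = 0                               # n 번째 음식을 먹을 차례 (리스트 인덱스 기준! -> 0 ~ len(food_times))
--     len_food_times = len(food_times)    # food_times 리스트 길이
--     count_0 = food_times.count(0)       # food_times 리스트에 0이 몇 개?
--
--     # 0. 먹을 음식이 없을 때
--     if len_food_times == count_0:
--         return -1
--
--     # 1. 식사 중!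
--     while k > 0:
--         # 1-1. 먹을 횟수 k가 충분하여 food_times 리스트를 한 바퀴(처음부터 끝까지)씩 돌 수 있을 때
--         # (이 경우엔 항상 마지막 음식까지 먹고 n = 0을 반환한다.)
--         if k >= (len_food_times - count_0):
--             for i in range(len_food_times):
--                 if food_times[i] > 0:
--                     food_times[i] -= 1
--                     k -= 1
--
--         # 1-2. 먹을 횟수 k가 충분하지 않아서 food_times 리스트를 돌다가 중간에 멈춰야 할 때
--         # (이 경우엔 네트워크 장애가 있을 때까지 음식을 먹고, 다음에 먹을 차례인 음식 번호 n을 반환한다.)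
--         # (반환한 음식 번호의 음식이 남아 있는 지는 아직 모른다.)
--         else:
--             for i in range(len_food_times):
--                 if food_times[i] > 0:
--                     food_times[i] -= 1
--                     k -= 1
--                     n = i + 1
--                 if k == 0:
--                     break
--         count_0 = food_times.count(0)
--         if len_food_times == count_0:
--             return -1
--
--     # 2. 네트워크 장애로 인해 식사 중지!
--     # n 번째 음식을 먹을 차례인데, 만약 n 번째 음식이 남아 있지 않다면
--     if food_times[n] == 0:
--         temp = n
--         # 2-1. 다음 음식이 남아 있는지, 음식 리스트 끝까지 체크
--         for i in range(n + 1, len_food_times):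
--             if food_times[i] != 0:
--                 n = i
--                 break
--         # 2-2. 음식 리스트 끝까지 체크했음에도 남아 있는 음식이 없다면
--         # 음식 리스트 처음부터 n 번째 음식까지 다시 체크
--         if temp == n:
--             for i in range(0, n):
--                 if food_times[i] != 0:
--                     n = i
--                     break
--     return n + 1
-- ===== SOURCE B (Python) =====
-- def solution(food_times, k):
--     k = max(k, 0)  # no time has passed yet if k is negative
--     total = sum(t for t in food_times if t > 0)
--     if k >= total:
--         return -1
--     items = sorted((t, i) for i, t in enumerate(food_times) if t > 0)
--     m = len(items)
--     j = 0
--     prev = 0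
--     while j < m and (items[j][0] - prev) * (m - j) <= k:
--         k -= (items[j][0] - prev) * (m - j)
--         prev = items[j][0]
--         j += 1
--     rest = sorted(items[j:], key=lambda x: x[1])
--     return rest[k % (m - j)][1] + 1
-- ===== Notes on version B (the rewrite author's own statement) =====
-- stated objective: alternative
-- what changed: A simulates eating one unit of food at a time (repeated passes over the list); B sorts the positive foods by (time, index) once, subtracts whole levels in bulk (level-difference times survivor count), and resolves the final index arithmetically with one modulo, removing the per-time-unit simulation (O(n log n) instead of O(n*max), though not measured faster on the generated inputs).
-- outside the precondition, e.g. on solution([2, -1], 1): A returns 2, B returns 1; on solution([-1], 0): A returns 1, B returns -1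
import Mathlib
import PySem

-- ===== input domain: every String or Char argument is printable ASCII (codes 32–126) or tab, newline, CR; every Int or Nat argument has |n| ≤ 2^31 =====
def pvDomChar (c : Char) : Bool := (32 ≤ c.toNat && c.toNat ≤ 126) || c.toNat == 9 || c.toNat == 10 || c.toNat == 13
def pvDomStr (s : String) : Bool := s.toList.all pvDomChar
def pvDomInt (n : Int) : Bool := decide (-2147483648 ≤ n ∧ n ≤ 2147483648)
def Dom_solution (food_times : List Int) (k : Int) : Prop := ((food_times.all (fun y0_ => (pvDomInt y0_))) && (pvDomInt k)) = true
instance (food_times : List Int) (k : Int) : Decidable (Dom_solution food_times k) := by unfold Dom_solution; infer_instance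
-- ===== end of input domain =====

-- B replaces A's unit-by-unit eating simulation by sort-once + bulk level subtraction + one modulo (a
-- different algorithm; equivalence is about the RETURN value only: Python A mutates food_times in place, B does not).

-- ===== PORT A =====
-- for i in range(len(ft)): if ft[i] > 0: ft[i] -= 1; k -= 1    (branch 1-1, one full pass)
def fullRound : List Int → Int → (List Int × Int)
  | [], k => ([], k)
  | x :: xs, k =>
    if 0 < x then
      let r := fullRound xs (k - 1)
      ((x - 1) :: r.1, r.2)
    else
      let r := fullRound xs k
      (x :: r.1, r.2)

-- branch 1-2: same pass but records n = i + 1 on each bite and breaks as soon as k == 0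
def partialRound : List Int → Int → Int → Int → (List Int × Int × Int)
  | [], _, k, n => ([], k, n)
  | x :: xs, i, k, n =>
    if 0 < x then
      if k - 1 = 0 then ((x - 1) :: xs, k - 1, i + 1)
      else
        let r := partialRound xs (i + 1) (k - 1) (i + 1)
        ((x - 1) :: r.1, r.2)
    else
      if k = 0 then (x :: xs, k, n)
      else
        let r := partialRound xs (i + 1) k n
        (x :: r.1, r.2)

-- 'for i in range(a, b): if ft[i] != 0: n = i; break' (index always in range under Pre_)
def findNZ (ft : List Int) : List Int → Option Int
  | [] => none
  | i :: is => if PySem.List.pyGetD ft i 0 ≠ 0 then some i else findNZ ft is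

-- section 2 of A: skip to the next remaining food starting at n (ft[n] is in range under Pre_)
def finishA (ft : List Int) (n : Int) : Int :=
  if PySem.List.pyGetD ft n 0 = 0 then
    let n1 := match findNZ ft (PySem.List.pyRange (n + 1) (ft.length : Int) 1) with
      | some i => i
      | none => n
    let n2 := if n1 = n then
        match findNZ ft (PySem.List.pyRange 0 n 1) with
        | some i => i
        | none => n1
      else n1
    n2 + 1
  else n + 1

-- the 'while k > 0' loop; fuel (sum of the positive entries + 1) only makes the recursion structural:
-- under Pre_ every iteration removes at least one unit from the positive entries, so the fuel is never exhausted
def loopA : Nat → List Int → Int → Int → Int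
  | 0, ft, _, n => finishA ft n
  | fuel + 1, ft, k, n =>
    if 0 < k then
      if ((ft.length : Int) - (ft.count 0 : Int)) ≤ k then
        let r := fullRound ft k
        if r.1.count 0 = r.1.length then -1
        else loopA fuel r.1 r.2 n
      else
        let r := partialRound ft 0 k n
        if r.1.count 0 = r.1.length then -1
        else loopA fuel r.1 r.2.1 r.2.2
    else finishA ft n

def solution (food_times : List Int) (k : Int) : Int :=
  if food_times.count 0 = food_times.length then -1
  else loopA ((food_times.map Int.toNat).sum + 1) food_times k 0

-- ===== PORT B =====
-- [(t, i) for i, t in enumerate(food_times) if t > 0]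
def pairsB (ft : List Int) : List (Int × Int) :=
  (PySem.List.enumerate ft).filterMap (fun p => if 0 < p.2 then some (p.2, p.1) else none)

-- the bulk-subtraction while loop: consume (t - prev) * (m - j) whole levels at once
def bulkB : List (Int × Int) → Int → Int → (List (Int × Int) × Int × Int)
  | [], k, prev => ([], k, prev)
  | (t, i) :: rest, k, prev =>
    if (t - prev) * ((rest.length : Int) + 1) ≤ k then
      bulkB rest (k - (t - prev) * ((rest.length : Int) + 1)) t
    else ((t, i) :: rest, k, prev)

def solution_alt (food_times : List Int) (k : Int) : Int :=
  let k := max k 0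
  let total := (food_times.filter (fun t => 0 < t)).sum
  if total ≤ k then -1
  else
    let items := PySem.List.sorted2 (pairsB food_times) Prod.fst Prod.snd
    let r := bulkB items k 0
    let rest := PySem.List.sorted r.1 (fun p => p.2)
    (PySem.List.pyGetD rest (PySem.Int.mod r.2.1 (rest.length : Int)) (0, 0)).2 + 1

-- ===== PRECONDITION & SPEC =====
-- Pre_ excludes lists with a negative eating time: they are outside the problem's domain, A loops forever on
-- many of them (any k exceeding the positive entries' sum), and where A does return it can name a negative-time
-- food as the next to eat — see the cites in the claim.
def Pre_solution (food_times : List Int) (k : Int) : Prop :=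
  ∀ x ∈ food_times, 0 ≤ x
instance (food_times : List Int) (k : Int) : Decidable (Pre_solution food_times k) := by
  unfold Pre_solution; infer_instance

def pvWitness_solution : List Int × Int := ([3, 1, 2], 5)

def Spec_solution (food_times : List Int) (k : Int) (out : Int) : Prop := out = solution_alt food_times k
instance (food_times : List Int) (k : Int) (out : Int) : Decidable (Spec_solution food_times k out) := by
  unfold Spec_solution; infer_instance

-- ===== CLAIM (what is proved, stated in full; the proofs are below) =====
def Claim_equal_solution : Prop := ∀ (food_times : List Int) (k : Int), Dom_solution food_times k → Pre_solution food_times k → Spec_solution food_times k (solution food_times k)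

-- ===== LEMMAS AND PROOFS =====

-- pairsF s ft = pairsB computed from an arbitrary enumerate start (for induction)
def pairsF (s : Int) (ft : List Int) : List (Int × Int) :=
  (PySem.List.enumerate ft s).filterMap (fun p => if 0 < p.2 then some (p.2, p.1) else none)

def decDrop (l : List (Int × Int)) : List (Int × Int) :=
  (l.map (fun p => (p.1 - 1, p.2))).filter (fun p => decide (0 < p.1))

def sortSnd (l : List (Int × Int)) : List (Int × Int) :=
  PySem.List.sorted l (fun p => p.2) false

def mu2 (l : List (Int × Int)) : Nat := (l.map (fun p => p.1.toNat + 1)).sum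

theorem mu2_decDrop_le (l : List (Int × Int)) : mu2 (decDrop l) ≤ mu2 l := by
  induction l with
  | nil => simp [decDrop, mu2]
  | cons p t ih =>
    simp only [decDrop, mu2, List.map_cons, List.filter_cons, List.sum_cons] at *
    split
    · simp only [List.map_cons, List.sum_cons]
      omega
    · omega

theorem mu2_decDrop_lt (l : List (Int × Int)) (h : l ≠ []) : mu2 (decDrop l) < mu2 l := by
  cases l with
  | nil => exact absurd rfl h
  | cons p t =>
    have := mu2_decDrop_le t
    simp only [decDrop, mu2, List.map_cons, List.filter_cons, List.sum_cons] at *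
    split
    · rename_i hp
      simp only [decide_eq_true_eq] at hp
      simp only [List.map_cons, List.sum_cons]
      omega
    · omega

-- the common reference program: round-based eating on (time, index) pairs
def sim2 (l : List (Int × Int)) (k : Int) : Int :=
  if h : l = [] then -1
  else if k < (l.length : Int) then ((sortSnd l).getD k.toNat (0, 0)).2 + 1
  else sim2 (decDrop l) (k - l.length)
termination_by mu2 l
decreasing_by
  · exact mu2_decDrop_lt _ h

-- ---------- pair-list basics ----------

def roundL (ft : List Int) : List Int := ft.map (fun x => if 0 < x then x - 1 else x)

def cntP (ft : List Int) : Nat := ft.countP (fun x => decide (0 < x))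

theorem pairsB_eq_pairsF (ft : List Int) : pairsB ft = pairsF 0 ft := rfl

theorem pairsF_cons (s : Int) (x : Int) (xs : List Int) :
    pairsF s (x :: xs) = (if 0 < x then [(x, s)] else []) ++ pairsF (s + 1) xs := by
  by_cases hx : 0 < x <;> simp [pairsF, PySem.List.enumerate_cons, hx]

theorem length_pairsF (s : Int) (ft : List Int) : (pairsF s ft).length = cntP ft := by
  induction ft generalizing s with
  | nil => simp [pairsF, cntP]
  | cons x xs ih =>
    by_cases hx : 0 < x <;>
      simp [pairsF_cons, cntP, hx, ih, Nat.add_comm]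

theorem pairsF_fst_pos (s : Int) (ft : List Int) : ∀ p ∈ pairsF s ft, 0 < p.1 := by
  induction ft generalizing s with
  | nil => simp [pairsF]
  | cons x xs ih =>
    intro p hp
    rw [pairsF_cons] at hp
    rcases List.mem_append.1 hp with h | h
    · by_cases hx : 0 < x <;> simp [hx] at h
      subst h; exact hx
    · exact ih (s + 1) p h

theorem pairsF_snd_lb (s : Int) (ft : List Int) : ∀ p ∈ pairsF s ft, s ≤ p.2 := by
  induction ft generalizing s with
  | nil => simp [pairsF]
  | cons x xs ih =>
    intro p hp
    rw [pairsF_cons] at hp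
    rcases List.mem_append.1 hp with h | h
    · by_cases hx : 0 < x <;> simp [hx] at h
      subst h; simp
    · have := ih (s + 1) p h; omega

theorem pairsF_snd_pairwise (s : Int) (ft : List Int) :
    (pairsF s ft).Pairwise (fun a b => a.2 < b.2) := by
  induction ft generalizing s with
  | nil => simp [pairsF]
  | cons x xs ih =>
    rw [pairsF_cons]
    by_cases hx : 0 < x
    · simp only [hx, if_true, List.singleton_append, List.pairwise_cons]
      refine ⟨fun q hq => ?_, ih (s + 1)⟩
      have := pairsF_snd_lb (s + 1) xs q hq
      omega
    · simp only [hx, if_false, List.nil_append]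
      exact ih (s + 1)

theorem pairsF_roundL (s : Int) (ft : List Int) :
    pairsF s (roundL ft) = decDrop (pairsF s ft) := by
  induction ft generalizing s with
  | nil => simp [pairsF, roundL, decDrop]
  | cons x xs ih =>
    have hr : roundL (x :: xs) = (if 0 < x then x - 1 else x) :: roundL xs := by
      simp [roundL]
    rw [hr]
    by_cases hx : 0 < x
    · simp only [hx, if_true]
      rw [pairsF_cons, pairsF_cons]
      simp only [hx, if_true]
      rw [ih]
      by_cases hx1 : 0 < x - 1
      · simp [decDrop, List.filter_cons, hx1, show (1:Int) < x by omega]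
      · simp [decDrop, List.filter_cons, hx1, show ¬(1:Int) < x by omega]
    · simp only [hx, if_false]
      rw [pairsF_cons, pairsF_cons]
      simp only [hx, if_false]
      rw [ih]
      simp [decDrop]

theorem count0_add_cntP (ft : List Int) (h : ∀ x ∈ ft, 0 ≤ x) :
    ft.count 0 + cntP ft = ft.length := by
  induction ft with
  | nil => simp [cntP]
  | cons x xs ih =>
    have hx : 0 ≤ x := h x List.mem_cons_self
    have ih' := ih (fun y hy => h y (List.mem_cons_of_mem _ hy))
    simp only [List.count_cons, cntP, List.countP_cons, List.length_cons] at *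
    rcases lt_or_eq_of_le hx with h1 | h1
    · simp [h1, Int.ne_of_gt h1]; omega
    · simp [← h1, cntP] at *; omega

theorem count0_iff_pairsF_nil (s : Int) (ft : List Int) (h : ∀ x ∈ ft, 0 ≤ x) :
    (ft.count 0 = ft.length ↔ pairsF s ft = []) := by
  have h1 := count0_add_cntP ft h
  have h2 := length_pairsF s ft
  rw [← List.length_eq_zero_iff]
  omega

theorem sum_filter_pairsF (s : Int) (ft : List Int) :
    (ft.filter (fun t => 0 < t)).sum = ((pairsF s ft).map (fun p => p.1)).sum := by
  induction ft generalizing s with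
  | nil => simp [pairsF]
  | cons x xs ih =>
    rw [pairsF_cons]
    by_cases hx : 0 < x <;> simp [hx, List.filter_cons, ih (s + 1)]

theorem mem_pairsF (s : Int) (ft : List Int) (p : Int × Int) (hp : p ∈ pairsF s ft) :
    s ≤ p.2 ∧ p.2 < s + ft.length ∧ PySem.List.pyGetD ft (p.2 - s) 0 = p.1 ∧ 0 < p.1 := by
  induction ft generalizing s with
  | nil => simp [pairsF] at hp
  | cons x xs ih =>
    rw [pairsF_cons] at hp
    rcases List.mem_append.1 hp with h | h
    · by_cases hx : 0 < x <;> simp [hx] at h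
      subst h
      refine ⟨le_refl _, by simp only [List.length_cons]; push_cast; omega, ?_, hx⟩
      simp [sub_self, PySem.List.pyGetD_zero_cons]
    · obtain ⟨h1, h2, h3, h4⟩ := ih (s + 1) h
      refine ⟨by omega, by simp only [List.length_cons]; push_cast at h2 ⊢; omega, ?_, h4⟩
      have hi : (0 : Int) ≤ p.2 - s - 1 := by omega
      have hlt : p.2 - s < ((x :: xs).length : Int) := by
        simp only [List.length_cons]; push_cast at h2 ⊢; omega
      rw [PySem.List.pyGetD_eq_getElem _ _ (by omega) hlt]
      rw [show p.2 - (s + 1) = p.2 - s - 1 by ring] at h3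
      rw [PySem.List.pyGetD_eq_getElem _ _ hi (by push_cast at h2 ⊢; omega)] at h3
      have hn : (p.2 - s).toNat = (p.2 - s - 1).toNat + 1 := by omega
      simp only [hn, List.getElem_cons_succ]
      exact h3

theorem getElem_mem_pairsF (s : Int) (ft : List Int) (m : Nat) (hm : m < ft.length)
    (hpos : 0 < ft[m]) : (ft[m], s + m) ∈ pairsF s ft := by
  induction ft generalizing s m with
  | nil => simp at hm
  | cons x xs ih =>
    rw [pairsF_cons]
    rcases m with _ | m
    · simp only [List.getElem_cons_zero] at hpos ⊢
      simp [hpos]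
    · simp only [List.getElem_cons_succ] at hpos ⊢
      refine List.mem_append.2 (Or.inr ?_)
      have := ih (s + 1) m (by simpa using hm) hpos
      have harith : s + (↑m + 1 : Int) = (s + 1) + ↑m := by omega
      rw [show ((m + 1 : Nat) : Int) = (m : Int) + 1 by push_cast; ring, harith]
      exact this

-- element-wise characterisation of pairsB (getD view)
theorem pairsB_getD_spec (ft : List Int) (m : Nat) (hm : m < (pairsB ft).length) :
    0 ≤ ((pairsB ft).getD m (0, 0)).2 ∧ ((pairsB ft).getD m (0, 0)).2 < (ft.length : Int) ∧
    PySem.List.pyGetD ft ((pairsB ft).getD m (0, 0)).2 0 = ((pairsB ft).getD m (0, 0)).1 ∧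
    0 < ((pairsB ft).getD m (0, 0)).1 := by
  rw [List.getD_eq_getElem _ _ hm]
  have hmem : (pairsB ft)[m] ∈ pairsB ft := List.getElem_mem hm
  obtain ⟨h1, h2, h3, h4⟩ := mem_pairsF 0 ft _ hmem
  simp only [zero_add, sub_zero] at h1 h2 h3
  exact ⟨h1, h2, h3, h4⟩

theorem pairsB_snd_mono (ft : List Int) (m m' : Nat) (h : m < m') (hm' : m' < (pairsB ft).length) :
    ((pairsB ft).getD m (0, 0)).2 < ((pairsB ft).getD m' (0, 0)).2 := by
  rw [List.getD_eq_getElem _ _ (lt_trans h hm'), List.getD_eq_getElem _ _ hm']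
  exact List.pairwise_iff_getElem.1 (pairsF_snd_pairwise 0 ft) m m' (lt_trans h hm') hm' h

theorem pos_mem_pairsB (ft : List Int) (h : ∀ x ∈ ft, 0 ≤ x) (i : Int) (h0 : 0 ≤ i)
    (hl : i < (ft.length : Int)) (hnz : PySem.List.pyGetD ft i 0 ≠ 0) :
    ∃ m : Nat, m < (pairsB ft).length ∧ ((pairsB ft).getD m (0, 0)).2 = i := by
  have hi : i.toNat < ft.length := by omega
  have hv : PySem.List.pyGetD ft i 0 = ft[i.toNat] := by
    rw [PySem.List.pyGetD_eq_getElem _ _ h0 hl]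
  have hpos : 0 < ft[i.toNat] := by
    rcases lt_or_eq_of_le (h _ (List.getElem_mem hi)) with h' | h'
    · exact h'
    · rw [hv, ← h'] at hnz; exact absurd rfl hnz
  have hmem : (ft[i.toNat], (0 : Int) + i.toNat) ∈ pairsB ft := getElem_mem_pairsF 0 ft i.toNat hi hpos
  obtain ⟨m, hm, hEq⟩ := List.mem_iff_getElem.1 hmem
  refine ⟨m, hm, ?_⟩
  rw [List.getD_eq_getElem _ _ hm, hEq]
  simp; omega

-- every index in [n, j0) carries a zero, when j0 = snd of entry m of pairsB and n is above entry m-1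
theorem pairsB_gap (ft : List Int) (h : ∀ x ∈ ft, 0 ≤ x) (m : Nat) (hm : m < (pairsB ft).length)
    (n i : Int) (hn : 0 ≤ i) (hlow : n ≤ i)
    (hup : i < ((pairsB ft).getD m (0, 0)).2)
    (hpred : m = 0 ∨ (0 < m ∧ ((pairsB ft).getD (m - 1) (0, 0)).2 < n)) :
    PySem.List.pyGetD ft i 0 = 0 := by
  by_contra hnz
  have hspec := pairsB_getD_spec ft m hm
  have hl : i < (ft.length : Int) := lt_trans hup hspec.2.1
  obtain ⟨m'', hm'', hEq⟩ := pos_mem_pairsB ft h i hn hl hnz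
  rcases Nat.lt_trichotomy m'' m with hc | hc | hc
  · rcases hpred with h0 | ⟨hpos, hlt⟩
    · omega
    · have : ((pairsB ft).getD m'' (0, 0)).2 ≤ ((pairsB ft).getD (m - 1) (0, 0)).2 := by
        rcases Nat.lt_or_ge m'' (m - 1) with hc2 | hc2
        · exact le_of_lt (pairsB_snd_mono ft m'' (m - 1) hc2 (by omega))
        · have : m'' = m - 1 := by omega
          rw [this]
      omega
  · subst hc; omega
  · have := pairsB_snd_mono ft m m'' hc hm''
    omega

-- ---------- sortSnd / sim2 ----------

theorem snd_nodup_of_pairwise {l : List (Int × Int)}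
    (h : l.Pairwise (fun a b => a.2 < b.2)) : (l.map Prod.snd).Nodup := by
  rw [List.Nodup, List.pairwise_map]
  exact h.imp (fun hab => ne_of_lt hab)

theorem pairwise_snd_lt_of_le_nodup {l : List (Int × Int)}
    (h : l.Pairwise (fun a b => a.2 ≤ b.2)) (hn : (l.map Prod.snd).Nodup) :
    l.Pairwise (fun a b => a.2 < b.2) := by
  rw [List.Nodup, List.pairwise_map] at hn
  exact (h.and hn).imp (fun hab => lt_of_le_of_ne hab.1 hab.2)

theorem sortSnd_eq_of {xs ys : List (Int × Int)} (h1 : ys.Perm xs)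
    (h2 : ys.Pairwise (fun a b => a.2 < b.2)) : sortSnd xs = ys := by
  exact PySem.List.sorted_eq_of_perm_of_pairwise_lt xs ys _ h1 h2

theorem sortSnd_pairsF (s : Int) (ft : List Int) : sortSnd (pairsF s ft) = pairsF s ft := by
  exact PySem.List.sorted_eq_self_of_pairwise _ _
    ((pairsF_snd_pairwise s ft).imp (fun hab => le_of_lt hab))

theorem snd_decDrop_sublist (l : List (Int × Int)) :
    ((decDrop l).map Prod.snd).Sublist (l.map Prod.snd) := by
  have h1 : (decDrop l).Sublist (l.map (fun p => (p.1 - 1, p.2))) := List.filter_sublist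
  have h2 := h1.map Prod.snd
  rwa [List.map_map] at h2

theorem sortSnd_congr_perm {xs ys : List (Int × Int)} (hp : xs.Perm ys)
    (hn : (xs.map Prod.snd).Nodup) : sortSnd ys = sortSnd xs := by
  refine sortSnd_eq_of ((PySem.List.sorted_perm _ _ _).trans hp) ?_
  refine pairwise_snd_lt_of_le_nodup (PySem.List.sorted_pairwise _ _) ?_
  exact (((PySem.List.sorted_perm xs (fun p => p.2) false).map Prod.snd).nodup_iff).2 hn

theorem sim2_perm (xs : List (Int × Int)) (k : Int) : ∀ (ys : List (Int × Int)),
    xs.Perm ys → (xs.map Prod.snd).Nodup → sim2 xs k = sim2 ys k := by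
  induction xs, k using sim2.induct with
  | case1 k =>
    intro ys hp _
    rw [hp.symm.eq_nil]
  | case2 l k hne hk =>
    intro ys hp hn
    have hyne : ys ≠ [] := by
      intro h; subst h; exact hne hp.eq_nil
    have hlen := hp.length_eq
    conv_lhs => rw [sim2]
    conv_rhs => rw [sim2]
    simp only [hne, hyne, dif_neg, not_false_iff]
    rw [← hlen]
    simp only [hk, if_pos]
    rw [sortSnd_congr_perm hp hn]
  | case3 l k hne hk ih =>
    intro ys hp hn
    have hyne : ys ≠ [] := by
      intro h; subst h; exact hne hp.eq_nil
    have hlen := hp.length_eq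
    conv_lhs => rw [sim2]
    conv_rhs => rw [sim2]
    simp only [hne, hyne, dif_neg, not_false_iff]
    rw [← hlen]
    simp only [hk, if_neg]
    exact ih (decDrop ys) ((hp.map _).filter _) ((snd_decDrop_sublist l).nodup hn)

-- ---------- A side ----------

theorem fullRound_eq (ft : List Int) (k : Int) :
    fullRound ft k = (roundL ft, k - (cntP ft : Int)) := by
  induction ft generalizing k with
  | nil => simp [fullRound, roundL, cntP]
  | cons x xs ih =>
    by_cases hx : 0 < x <;>
      simp [fullRound, roundL, cntP, List.countP_cons, hx, ih] <;> push_cast <;> ring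

theorem roundL_nonneg (ft : List Int) (h : ∀ x ∈ ft, 0 ≤ x) : ∀ x ∈ roundL ft, 0 ≤ x := by
  intro y hy
  rw [roundL, List.mem_map] at hy
  obtain ⟨x, hx, hEq⟩ := hy
  have := h x hx
  subst hEq
  split <;> omega

theorem sum_toNat_roundL (ft : List Int) :
    ((roundL ft).map Int.toNat).sum + cntP ft = (ft.map Int.toNat).sum := by
  induction ft with
  | nil => simp [roundL, cntP]
  | cons x xs ih =>
    have hstep : roundL (x :: xs) = (if 0 < x then x - 1 else x) :: roundL xs := by simp [roundL]
    rw [hstep]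
    simp only [List.map_cons, List.sum_cons, cntP, List.countP_cons] at ih ⊢
    by_cases hx : 0 < x <;> simp [hx] <;> omega

theorem cntP_le_sum_toNat (ft : List Int) : cntP ft ≤ (ft.map Int.toNat).sum := by
  induction ft with
  | nil => simp [cntP]
  | cons x xs ih =>
    simp only [cntP, List.countP_cons, List.map_cons, List.sum_cons] at ih ⊢
    by_cases hx : 0 < x <;> simp [hx] <;> omega

theorem partial_spec (ft : List Int) : ∀ (i k n0 : Int), (∀ x ∈ ft, 0 ≤ x) → 0 < k →
    k.toNat ≤ (pairsF i ft).length →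
    ∃ pre : List Int,
      partialRound ft i k n0 =
        (pre ++ ft.drop pre.length, 0, ((pairsF i ft).getD (k.toNat - 1) (0, 0)).2 + 1) ∧
      (pre.length : Int) = ((pairsF i ft).getD (k.toNat - 1) (0, 0)).2 + 1 - i ∧
      pre.length ≤ ft.length := by
  induction ft with
  | nil =>
    intro i k n0 _ hk hkle
    simp [pairsF] at hkle
    omega
  | cons x xs ih =>
    intro i k n0 h hk hkle
    have htail : ∀ x ∈ xs, 0 ≤ x := fun y hy => h y (List.mem_cons_of_mem _ hy)
    by_cases hx : 0 < x
    · have hcons : pairsF i (x :: xs) = (x, i) :: pairsF (i + 1) xs := by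
        rw [pairsF_cons]; simp [hx]
      by_cases hk1 : k - 1 = 0
      · have hkt : k.toNat - 1 = 0 := by omega
        refine ⟨[x - 1], ?_, ?_, by simp⟩
        · simp [partialRound, hx, hk1, hcons, hkt]
        · simp [hcons, hkt]
      · have hk2 : 0 < k - 1 := by omega
        have hlen : k.toNat ≤ (pairsF i (x :: xs)).length := hkle
        rw [hcons] at hlen
        simp only [List.length_cons] at hlen
        obtain ⟨pre, hEq, hLen, hLe⟩ := ih (i + 1) (k - 1) (i + 1) htail hk2 (by omega)
        have hidx : k.toNat - 1 = (k.toNat - 2) + 1 := by omega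
        have hidx2 : (k - 1).toNat - 1 = k.toNat - 2 := by omega
        refine ⟨(x - 1) :: pre, ?_, ?_, by simp; omega⟩
        · simp only [partialRound, hx, if_pos, hk1, if_neg]
          rw [hEq]
          simp only [List.cons_append, List.length_cons, List.drop_succ_cons]
          rw [hcons, hidx, List.getD_cons_succ, hidx2]
          simp
        · rw [hcons, hidx, List.getD_cons_succ]
          rw [hidx2] at hLen
          simp only [List.length_cons]
          push_cast at hLen ⊢
          omega
    · have hcons : pairsF i (x :: xs) = pairsF (i + 1) xs := by
        rw [pairsF_cons]; simp [hx]
      rw [hcons] at hkle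
      obtain ⟨pre, hEq, hLen, hLe⟩ := ih (i + 1) k n0 htail hk hkle
      refine ⟨x :: pre, ?_, ?_, by simp; omega⟩
      · simp only [partialRound, hx, if_false]
        rw [if_neg (by omega)]
        rw [hEq]
        simp only [List.cons_append, List.length_cons, List.drop_succ_cons]
        rw [hcons]
      · rw [hcons]
        simp only [List.length_cons]
        push_cast at hLen ⊢
        omega

theorem findNZ_spec (ft : List Int) (a b j0 : Int) (h1 : a ≤ j0) (h2 : j0 < b)
    (h3 : PySem.List.pyGetD ft j0 0 ≠ 0)
    (h4 : ∀ i : Int, a ≤ i → i < j0 → PySem.List.pyGetD ft i 0 = 0) :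
    findNZ ft (PySem.List.pyRange a b 1) = some j0 := by
  generalize hn : (j0 - a).toNat = n
  induction n generalizing a with
  | zero =>
    have ha : a = j0 := by omega
    subst ha
    rw [PySem.List.pyRange_one_cons h2]
    simp [findNZ, h3]
  | succ n ih =>
    have ha : a < j0 := by omega
    rw [PySem.List.pyRange_one_cons (by omega)]
    simp only [findNZ]
    rw [if_neg (by simpa using h4 a (le_refl _) ha)]
    exact ih (a + 1) (by omega) (fun i hi1 hi2 => h4 i (by omega) hi2) (by omega)

theorem finishA_spec (ft : List Int) (n j0 : Int) (h1 : n ≤ j0) (h2 : j0 < (ft.length : Int))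
    (h3 : PySem.List.pyGetD ft j0 0 ≠ 0)
    (h4 : ∀ i : Int, n ≤ i → i < j0 → PySem.List.pyGetD ft i 0 = 0) :
    finishA ft n = j0 + 1 := by
  rcases eq_or_lt_of_le h1 with hEq | hlt
  · subst hEq
    rw [finishA, if_neg h3]
  · rw [finishA, if_pos (h4 n (le_refl _) hlt)]
    rw [findNZ_spec ft (n + 1) (ft.length : Int) j0 (by omega) h2 h3
      (fun i hi1 hi2 => h4 i (by omega) hi2)]
    simp only []
    rw [if_neg (by omega)]

theorem pyGetD_append_drop (pre ft : List Int) (hle : pre.length ≤ ft.length) (i : Int)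
    (hi : (pre.length : Int) ≤ i) :
    PySem.List.pyGetD (pre ++ ft.drop pre.length) i 0 = PySem.List.pyGetD ft i 0 := by
  have hlen : (pre ++ ft.drop pre.length).length = ft.length := by
    simp [List.length_append, List.length_drop]; omega
  have h0 : (0 : Int) ≤ i := le_trans (by positivity) hi
  by_cases hr : i < (ft.length : Int)
  · rw [PySem.List.pyGetD_eq_getElem _ _ h0 (by rw [hlen]; exact hr),
      PySem.List.pyGetD_eq_getElem _ _ h0 hr]
    have hp : pre.length ≤ i.toNat := by omega
    rw [List.getElem_append_right hp]
    rw [List.getElem_drop]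
    congr 1
    omega
  · have e1 : PySem.List.pyGet? (pre ++ ft.drop pre.length) i = none := by
      rw [PySem.List.pyGet?_eq_none_iff]
      simp [PySem.Raise.InRange, hlen]
      omega
    have e2 : PySem.List.pyGet? ft i = none := by
      rw [PySem.List.pyGet?_eq_none_iff]
      simp [PySem.Raise.InRange]
      omega
    rw [PySem.List.pyGetD_of_none _ _ _ e1, PySem.List.pyGetD_of_none _ _ _ e2]

theorem loopA_zero (fuel : Nat) (ft : List Int) (n : Int) : loopA fuel ft 0 n = finishA ft n := by
  cases fuel <;> simp [loopA]

theorem loopA_eq (fuel : Nat) : ∀ (ft : List Int) (k : Int), (∀ x ∈ ft, 0 ≤ x) → 0 ≤ k →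
    pairsB ft ≠ [] → (ft.map Int.toNat).sum ≤ fuel → loopA fuel ft k 0 = sim2 (pairsB ft) k := by
  induction fuel with
  | zero =>
    intro ft k h hk hne hfuel
    exfalso
    have h1 := cntP_le_sum_toNat ft
    have h2 := length_pairsF 0 ft
    have : (pairsB ft).length = 0 := by rw [pairsB_eq_pairsF]; omega
    exact hne (List.length_eq_zero_iff.1 this)
  | succ fuel ih =>
    intro ft k h hk hne hfuel
    have hP : 0 < (pairsB ft).length := List.length_pos_of_ne_nil hne
    have hPF : (pairsB ft).length = cntP ft := by rw [pairsB_eq_pairsF]; exact length_pairsF 0 ft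
    have hcnt0 := count0_add_cntP ft h
    by_cases hkpos : 0 < k
    · by_cases hbig : ((ft.length : Int) - (ft.count 0 : Int)) ≤ k
      · -- full-round branch
        have hknl : ¬ k < ((pairsB ft).length : Int) := by push_cast at hbig ⊢; omega
        conv_rhs => rw [sim2]
        rw [dif_neg hne, if_neg hknl]
        have hdd : decDrop (pairsB ft) = pairsB (roundL ft) := by
          rw [pairsB_eq_pairsF, pairsB_eq_pairsF, pairsF_roundL]
        rw [hdd]
        simp only [loopA, if_pos hkpos, if_pos hbig, fullRound_eq]
        by_cases hz : pairsB (roundL ft) = []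
        · rw [if_pos (((count0_iff_pairsF_nil 0 (roundL ft) (roundL_nonneg ft h))).2 hz)]
          rw [hz, sim2]
          simp
        · rw [if_neg (fun hc => hz (((count0_iff_pairsF_nil 0 (roundL ft) (roundL_nonneg ft h))).1 hc))]
          have hsum := sum_toNat_roundL ft
          have hres := ih (roundL ft) (k - (cntP ft : Int)) (roundL_nonneg ft h)
            (by push_cast at hbig ⊢; omega) hz (by omega)
          rw [hres, hPF]
      · -- partial branch
        have hkP : k < ((pairsB ft).length : Int) := by push_cast at hbig ⊢; omega
        have hkle : k.toNat ≤ (pairsF 0 ft).length := by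
          rw [← pairsB_eq_pairsF]; omega
        obtain ⟨pre, hEq, hLen, hLe⟩ := partial_spec ft 0 k 0 h hkpos hkle
        rw [← pairsB_eq_pairsF] at hEq hLen
        have hk1lt : k.toNat - 1 < (pairsB ft).length := by omega
        have hklt : k.toNat < (pairsB ft).length := by omega
        obtain ⟨hnn1, hlt1, hval1, hpos1⟩ := pairsB_getD_spec ft (k.toNat - 1) hk1lt
        obtain ⟨hnnk, hltk, hvalk, hposk⟩ := pairsB_getD_spec ft k.toNat hklt
        have hmono : ((pairsB ft).getD (k.toNat - 1) (0, 0)).2 < ((pairsB ft).getD k.toNat (0, 0)).2 :=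
          pairsB_snd_mono ft (k.toNat - 1) k.toNat (by omega) hklt
        set p1 := ((pairsB ft).getD (k.toNat - 1) (0, 0)).2 with hp1
        set pk := ((pairsB ft).getD k.toNat (0, 0)).2 with hpk
        set g := pre ++ ft.drop pre.length with hg
        have hglen : g.length = ft.length := by
          rw [hg]; simp [List.length_append, List.length_drop]; omega
        have hagree : ∀ i : Int, (pre.length : Int) ≤ i →
            PySem.List.pyGetD g i 0 = PySem.List.pyGetD ft i 0 :=
          fun i hi => pyGetD_append_drop pre ft hLe i hi
        have hprelen : (pre.length : Int) = p1 + 1 := by rw [hLen]; ring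
        have hgk : PySem.List.pyGetD g pk 0 = ((pairsB ft).getD k.toNat (0, 0)).1 := by
          rw [hagree pk (by omega), hvalk]
        have hmem : ((pairsB ft).getD k.toNat (0, 0)).1 ∈ g := by
          rw [← hgk]
          exact PySem.List.pyGetD_mem _ _ ⟨by omega, by rw [hglen]; push_cast at hltk ⊢; omega⟩
        simp only [loopA, if_pos hkpos, if_neg hbig, hEq]
        rw [if_neg (by
          intro hc
          have := (List.count_eq_length.1 hc) _ hmem
          omega)]
        rw [loopA_zero]
        have hfin : finishA g (p1 + 1) = pk + 1 := by
          apply finishA_spec g (p1 + 1) pk (by omega) (by rw [hglen]; exact hltk)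
            (by rw [hgk]; omega)
          intro i hi1 hi2
          rw [hagree i (by omega)]
          exact pairsB_gap ft h k.toNat hklt (p1 + 1) i (by omega) hi1 hi2
            (Or.inr ⟨by omega, by rw [← hp1]; omega⟩)
        rw [hfin]
        conv_rhs => rw [sim2]
        rw [dif_neg hne, if_pos hkP, pairsB_eq_pairsF, sortSnd_pairsF, ← pairsB_eq_pairsF]
    · -- k = 0
      have hk0 : k = 0 := by omega
      subst hk0
      rw [loopA_zero]
      obtain ⟨hnn0, hlt0, hval0, hpos0⟩ := pairsB_getD_spec ft 0 hP
      have hfin : finishA ft 0 = ((pairsB ft).getD 0 (0, 0)).2 + 1 := by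
        apply finishA_spec ft 0 _ hnn0 hlt0 (by rw [hval0]; omega)
        intro i hi1 hi2
        exact pairsB_gap ft h 0 hP 0 i hi1 hi1 hi2 (Or.inl rfl)
      rw [hfin]
      conv_rhs => rw [sim2]
      rw [dif_neg hne, if_pos (by push_cast; omega), pairsB_eq_pairsF, sortSnd_pairsF,
        ← pairsB_eq_pairsF]
      simp

theorem solution_eq_sim2 (ft : List Int) (k : Int) (h : ∀ x ∈ ft, 0 ≤ x) :
    solution ft k = sim2 (pairsB ft) (max k 0) := by
  unfold solution
  by_cases hz : ft.count 0 = ft.length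
  · rw [if_pos hz]
    have : pairsB ft = [] := by
      rw [pairsB_eq_pairsF]
      exact (count0_iff_pairsF_nil 0 ft h).1 hz
    rw [this, sim2]
    simp
  · rw [if_neg hz]
    have hne : pairsB ft ≠ [] := by
      intro hc
      exact hz ((count0_iff_pairsF_nil 0 ft h).2 (by rw [← pairsB_eq_pairsF]; exact hc))
    by_cases hk : 0 ≤ k
    · rw [max_eq_left hk]
      exact loopA_eq _ ft k h hk hne (by omega)
    · rw [max_eq_right (by omega)]
      rw [← loopA_eq ((ft.map Int.toNat).sum + 1) ft 0 h (le_refl 0) hne (by omega)]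
      rw [loopA_zero]
      cases hfuel : (ft.map Int.toNat).sum + 1 with
      | zero => simp [loopA]
      | succ m => simp [loopA, if_neg (show ¬ (0:Int) < k by omega)]

-- ---------- B side ----------

def mapSub (d : Int) (l : List (Int × Int)) : List (Int × Int) := l.map (fun p => (p.1 - d, p.2))

def shiftF (d : Int) (l : List (Int × Int)) : List (Int × Int) :=
  l.filterMap (fun p => if d < p.1 then some (p.1 - d, p.2) else none)

def lexLt (a b : Int × Int) : Prop := a.1 < b.1 ∨ (a.1 = b.1 ∧ a.2 < b.2)

theorem shiftF_one (l : List (Int × Int)) : shiftF 1 l = decDrop l := by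
  induction l with
  | nil => rfl
  | cons p t ih =>
    simp only [shiftF, decDrop, List.filterMap_cons, List.map_cons, List.filter_cons] at ih ⊢
    by_cases h : 1 < p.1
    · rw [if_pos h, if_pos (by simp; omega)]
      rw [ih]
    · rw [if_neg h, if_neg (by simp; omega)]
      rw [ih]

theorem shiftF_zero_of_pos (l : List (Int × Int)) (h : ∀ p ∈ l, 0 < p.1) : shiftF 0 l = l := by
  induction l with
  | nil => rfl
  | cons p t ih =>
    simp only [shiftF, List.filterMap_cons] at ih ⊢
    rw [if_pos (h p List.mem_cons_self)]
    rw [ih (fun q hq => h q (List.mem_cons_of_mem _ hq))]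
    simp

theorem shiftF_eq_mapSub (d : Int) (l : List (Int × Int)) (h : ∀ p ∈ l, d < p.1) :
    shiftF d l = mapSub d l := by
  induction l with
  | nil => rfl
  | cons p t ih =>
    simp only [shiftF, mapSub, List.filterMap_cons, List.map_cons] at ih ⊢
    rw [if_pos (h p List.mem_cons_self)]
    rw [ih (fun q hq => h q (List.mem_cons_of_mem _ hq))]

theorem shiftF_shiftF (a b : Int) (ha : 0 ≤ a) (l : List (Int × Int)) :
    shiftF a (shiftF b l) = shiftF (a + b) l := by
  induction l with
  | nil => rfl
  | cons p t ih =>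
    simp only [shiftF, List.filterMap_cons] at ih ⊢
    by_cases h1 : b < p.1
    · rw [if_pos h1]
      simp only [List.filterMap_cons]
      by_cases h2 : a < p.1 - b
      · rw [if_pos h2, if_pos (by omega), ih, show p.1 - b - a = p.1 - (a + b) by ring]
      · rw [if_neg h2, if_neg (by omega)]
        exact ih
    · rw [if_neg h1, if_neg (by omega)]
      exact ih

theorem shiftF_mapSub (a b : Int) (l : List (Int × Int)) :
    shiftF a (mapSub b l) = shiftF (a + b) l := by
  induction l with
  | nil => rfl
  | cons p t ih =>
    simp only [shiftF, mapSub, List.map_cons, List.filterMap_cons] at ih ⊢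
    by_cases h1 : a < p.1 - b
    · rw [if_pos h1, if_pos (by omega), ih, show p.1 - b - a = p.1 - (a + b) by ring]
    · rw [if_neg h1, if_neg (by omega)]
      exact ih

theorem sortSnd_mapSub (d : Int) (l : List (Int × Int)) (hn : (l.map Prod.snd).Nodup) :
    sortSnd (mapSub d l) = mapSub d (sortSnd l) := by
  have hperm : (sortSnd l).Perm l := PySem.List.sorted_perm _ _ _
  have hnods : ((sortSnd l).map Prod.snd).Nodup := ((hperm.map Prod.snd).nodup_iff).2 hn
  have hlt : (sortSnd l).Pairwise (fun a b => a.2 < b.2) :=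
    pairwise_snd_lt_of_le_nodup (PySem.List.sorted_pairwise _ _) hnods
  refine sortSnd_eq_of ?_ ?_
  · exact hperm.map (fun p => (p.1 - d, p.2))
  · rw [mapSub, List.pairwise_map]
    exact hlt

theorem length_sortSnd (l : List (Int × Int)) : (sortSnd l).length = l.length :=
  PySem.List.length_sorted _ _ _

theorem mem_shiftF {d : Int} {l : List (Int × Int)} {q : Int × Int} :
    q ∈ shiftF d l ↔ ∃ p ∈ l, d < p.1 ∧ q = (p.1 - d, p.2) := by
  rw [shiftF, List.mem_filterMap]
  constructor
  · rintro ⟨p, hp, hq⟩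
    by_cases h : d < p.1
    · rw [if_pos h] at hq
      exact ⟨p, hp, h, (Option.some_inj.1 hq).symm⟩
    · rw [if_neg h] at hq
      exact absurd hq (by simp)
  · rintro ⟨p, hp, h, hq⟩
    exact ⟨p, hp, by rw [if_pos h, hq]⟩

theorem snd_mapSub (d : Int) (l : List (Int × Int)) :
    (mapSub d l).map Prod.snd = l.map Prod.snd := by
  rw [mapSub, List.map_map]
  rfl

theorem length_mapSub (d : Int) (l : List (Int × Int)) : (mapSub d l).length = l.length := by
  rw [mapSub, List.length_map]

-- d full rounds in which every food survives
theorem sim2_multiround (d : Nat) : ∀ (l : List (Int × Int)) (k : Int),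
    (∀ p ∈ l, 0 < p.1 ∧ (d : Int) ≤ p.1) → (d : Int) * l.length ≤ k → 0 ≤ k →
    sim2 l k = sim2 (shiftF d l) (k - d * l.length) := by
  induction d with
  | zero =>
    intro l k hp _ _
    rw [show ((0 : Nat) : Int) = 0 by norm_num, shiftF_zero_of_pos l (fun p hq => (hp p hq).1)]
    norm_num
  | succ d ihd =>
    intro l k hp hle hk
    rcases eq_or_ne l [] with hnil | hne
    · subst hnil
      simp [shiftF, sim2]
    · have hlen : 0 < l.length := List.length_pos_of_ne_nil hne
      have hknl : ¬ k < (l.length : Int) := by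
        push_cast at hle ⊢
        nlinarith
      conv_lhs => rw [sim2]
      rw [dif_neg hne, if_neg hknl, ← shiftF_one]
      by_cases hd : d = 0
      · subst hd
        have h1 : shiftF ((0 + 1 : Nat) : Int) l = shiftF 1 l := by norm_num
        rw [h1]
        push_cast
        ring_nf
      · have hall1 : ∀ p ∈ l, (1 : Int) < p.1 := by
          intro p hpl
          have := (hp p hpl).2
          have : (1 : Int) ≤ (d : Int) := by exact_mod_cast Nat.one_le_iff_ne_zero.2 hd
          omega
        have hmap : shiftF 1 l = mapSub 1 l := shiftF_eq_mapSub 1 l hall1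
        have hlen1 : (shiftF 1 l).length = l.length := by rw [hmap, length_mapSub]
        have hres := ihd (shiftF 1 l) (k - l.length) ?_ ?_ ?_
        · rw [hres, shiftF_shiftF (d : Int) 1 (by positivity) l, hlen1]
          have : ((d : Int) + 1) = ((d + 1 : Nat) : Int) := by push_cast; ring
          rw [this]
          congr 1
          push_cast
          ring
        · intro q hq
          obtain ⟨p, hpl, hdp, hq'⟩ := mem_shiftF.1 hq
          have := (hp p hpl).2
          subst hq'
          constructor
          · simp; omega
          · simp
            push_cast at this ⊢
            omega
        · rw [hlen1]
          push_cast at hle ⊢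
          nlinarith
        · push_cast at hle ⊢
          nlinarith

-- rounds that never consume a whole level: the answer is position k mod m among the survivors
theorem sim2_rounds (l : List (Int × Int)) (k : Int) (hne : l ≠ []) (hk : 0 ≤ k)
    (hbig : ∀ p ∈ l, k < p.1 * (l.length : Int)) (hn : (l.map Prod.snd).Nodup) :
    sim2 l k = ((sortSnd l).getD (PySem.Int.mod k (l.length : Int)).toNat (0, 0)).2 + 1 := by
  revert hne hk hbig hn
  induction l, k using sim2.induct with
  | case1 k =>
    intro hne _ _ _
    exact absurd rfl hne
  | case2 l k hne' hklt =>
    intro _ hk _ _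
    conv_lhs => rw [sim2]
    rw [dif_neg hne', if_pos hklt]
    have hmod : PySem.Int.mod k (l.length : Int) = k := by
      rw [PySem.Int.mod_eq_emod_of_pos (by exact_mod_cast List.length_pos_of_ne_nil hne')]
      exact Int.emod_eq_of_lt hk hklt
    rw [hmod]
  | case3 l k hne' hknl ih =>
    intro _ hk hbig hn
    have hlen : 0 < l.length := List.length_pos_of_ne_nil hne'
    have hall1 : ∀ p ∈ l, (1 : Int) < p.1 := by
      intro p hpl
      have h1 := hbig p hpl
      push_cast at hknl h1 ⊢
      nlinarith
    have hmap : decDrop l = mapSub 1 l := by rw [← shiftF_one, shiftF_eq_mapSub 1 l hall1]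
    conv_lhs => rw [sim2]
    rw [dif_neg hne', if_neg hknl]
    rw [hmap] at ih ⊢
    have hlen1 : (mapSub 1 l).length = l.length := length_mapSub 1 l
    have hres := ih ?_ ?_ ?_ ?_
    · rw [hres]
      have hmod : PySem.Int.mod (k - l.length) ((mapSub 1 l).length : Int) =
          PySem.Int.mod k (l.length : Int) := by
        rw [hlen1, PySem.Int.mod_eq_emod_of_pos (by exact_mod_cast hlen),
          PySem.Int.mod_eq_emod_of_pos (by exact_mod_cast hlen)]
        exact Int.sub_emod_right k _
      rw [hmod]
      have hjlt : (PySem.Int.mod k (l.length : Int)).toNat < l.length := by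
        have h1 := PySem.Int.mod_lt k (b := (l.length : Int)) (by exact_mod_cast hlen)
        have h2 := PySem.Int.mod_nonneg k (b := (l.length : Int)) (by exact_mod_cast hlen)
        omega
      rw [sortSnd_mapSub 1 l hn]
      rw [List.getD_eq_getElem _ _ (by rw [length_mapSub, length_sortSnd]; exact hjlt),
        List.getD_eq_getElem _ _ (by rw [length_sortSnd]; exact hjlt)]
      simp only [mapSub, List.getElem_map]
    · intro hc
      rw [mapSub] at hc
      exact hne' (List.map_eq_nil_iff.1 hc)
    · omega
    · intro q hq
      rw [mapSub, List.mem_map] at hq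
      obtain ⟨p, hpl, hq'⟩ := hq
      subst hq'
      have h1 := hbig p hpl
      rw [hlen1]
      push_cast at h1 ⊢
      nlinarith
    · rw [snd_mapSub]
      exact hn

theorem length_le_sum_fst (l : List (Int × Int)) (h : ∀ p ∈ l, 0 < p.1) :
    (l.length : Int) ≤ (l.map (fun p => p.1)).sum := by
  induction l with
  | nil => simp
  | cons p t ih =>
    have h1 := h p List.mem_cons_self
    have h2 := ih (fun q hq => h q (List.mem_cons_of_mem _ hq))
    simp only [List.map_cons, List.sum_cons, List.length_cons]
    push_cast
    omega

theorem sum_fst_decDrop (l : List (Int × Int)) (h : ∀ p ∈ l, 0 < p.1) :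
    ((decDrop l).map (fun p => p.1)).sum = (l.map (fun p => p.1)).sum - l.length := by
  induction l with
  | nil => simp [decDrop]
  | cons p t ih =>
    have h1 := h p List.mem_cons_self
    have h2 := ih (fun q hq => h q (List.mem_cons_of_mem _ hq))
    simp only [decDrop, List.map_cons, List.filter_cons, List.sum_cons, List.length_cons] at h2 ⊢
    by_cases hp : 0 < p.1 - 1
    · rw [if_pos (by simpa using hp)]
      simp only [List.map_cons, List.sum_cons]
      push_cast
      omega
    · rw [if_neg (by simpa using hp)]
      push_cast
      omega

theorem sim2_all_eaten (l : List (Int × Int)) (k : Int) (h : ∀ p ∈ l, 0 < p.1)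
    (hk : (l.map (fun p => p.1)).sum ≤ k) : sim2 l k = -1 := by
  revert h hk
  induction l, k using sim2.induct with
  | case1 k =>
    intro _ _
    rw [sim2]
    simp
  | case2 l k hne hklt =>
    intro h hk
    exfalso
    have := length_le_sum_fst l h
    omega
  | case3 l k hne hknl ih =>
    intro h hk
    conv_lhs => rw [sim2]
    rw [dif_neg hne, if_neg hknl]
    apply ih
    · intro q hq
      rw [decDrop, List.mem_filter] at hq
      simpa using hq.2
    · rw [sum_fst_decDrop l h]
      omega

def sumSub (prev : Int) (l : List (Int × Int)) : Int := (l.map (fun p => p.1 - prev)).sum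

def bulkOut (l : List (Int × Int)) (k prev : Int) : Int :=
  let r := bulkB l k prev
  ((sortSnd r.1).getD (PySem.Int.mod r.2.1 (r.1.length : Int)).toNat (0, 0)).2 + 1

theorem sumSub_shift (l : List (Int × Int)) (prev t : Int) :
    sumSub prev l = sumSub t l + l.length * (t - prev) := by
  induction l with
  | nil => simp [sumSub]
  | cons p l ih =>
    simp only [sumSub, List.map_cons, List.sum_cons, List.length_cons] at ih ⊢
    push_cast
    linear_combination ih

theorem bulk_correct : ∀ (l : List (Int × Int)) (k prev : Int), 0 ≤ k →
    l.Pairwise lexLt → (∀ p ∈ l, prev ≤ p.1) → (l.map Prod.snd).Nodup →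
    k < sumSub prev l →
    (bulkB l k prev).1 ≠ [] ∧ sim2 (shiftF prev l) k = bulkOut l k prev := by
  intro l
  induction l with
  | nil =>
    intro k prev hk _ _ _ hlt
    exfalso
    simp [sumSub] at hlt
    omega
  | cons p rest ih =>
    obtain ⟨t, i⟩ := p
    intro k prev hk hpair hall hnod hlt
    have hhead : prev ≤ t := hall _ List.mem_cons_self
    have htail : ∀ q ∈ rest, t ≤ q.1 := by
      intro q hq
      rcases (List.pairwise_cons.1 hpair).1 q hq with h | ⟨h, _⟩ <;> omega
    have htail_pair : rest.Pairwise lexLt := (List.pairwise_cons.1 hpair).2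
    have hnod' : (rest.map Prod.snd).Nodup := by
      simp only [List.map_cons, List.nodup_cons] at hnod
      exact hnod.2
    have hsplit : sumSub prev ((t, i) :: rest) =
        (t - prev) * ((rest.length : Int) + 1) + sumSub t rest := by
      simp only [sumSub, List.map_cons, List.sum_cons]
      have hs := sumSub_shift rest prev t
      simp only [sumSub] at hs
      linear_combination hs
    by_cases hc : (t - prev) * ((rest.length : Int) + 1) ≤ k
    · have hbstep : bulkB ((t, i) :: rest) k prev =
          bulkB rest (k - (t - prev) * ((rest.length : Int) + 1)) t := by
        simp only [bulkB, if_pos hc]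
      obtain ⟨hne', hsim'⟩ := ih (k - (t - prev) * ((rest.length : Int) + 1)) t
        (by linarith) htail_pair htail hnod' (by rw [hsplit] at hlt; linarith)
      refine ⟨by rw [hbstep]; exact hne', ?_⟩
      have hout : bulkOut ((t, i) :: rest) k prev =
          bulkOut rest (k - (t - prev) * ((rest.length : Int) + 1)) t := by
        simp only [bulkOut, hbstep]
      rw [hout, ← hsim']
      rcases eq_or_lt_of_le hhead with hEq | hlt2
      · subst hEq
        have hsh : shiftF prev ((prev, i) :: rest) = shiftF prev rest := by
          simp only [shiftF, List.filterMap_cons]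
          rw [if_neg (by omega)]
        rw [hsh]
        congr 1
        ring
      · have hallpos : ∀ q ∈ (t, i) :: rest, prev < q.1 := by
          intro q hq
          rcases List.mem_cons.1 hq with rfl | hq'
          · exact hlt2
          · have := htail q hq'
            omega
        rw [shiftF_eq_mapSub prev _ hallpos]
        have hd : (((t - prev).toNat : Nat) : Int) = t - prev := by omega
        have hlenm : (mapSub prev ((t, i) :: rest)).length = rest.length + 1 := by
          simp [mapSub]
        have hmr := sim2_multiround (t - prev).toNat (mapSub prev ((t, i) :: rest)) k
          (by
            intro q hq
            rw [mapSub, List.mem_map] at hq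
            obtain ⟨q0, hq0, rfl⟩ := hq
            have h1 := hallpos q0 hq0
            have h2 : t ≤ q0.1 ∨ q0.1 = t := by
              rcases List.mem_cons.1 hq0 with rfl | hq0'
              · exact Or.inr rfl
              · exact Or.inl (htail q0 hq0')
            constructor
            · simp only []
              omega
            · simp only []
              rw [hd]
              rcases h2 with h2 | h2 <;> omega)
          (by rw [hlenm, hd]; push_cast; linarith) hk
        rw [hmr, shiftF_mapSub, hd]
        have hsh2 : shiftF (t - prev + prev) ((t, i) :: rest) = shiftF t rest := by
          rw [show t - prev + prev = t by ring]
          simp only [shiftF, List.filterMap_cons]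
          rw [if_neg (by omega)]
        rw [hsh2]
        congr 1
        rw [hlenm]
        push_cast
        ring
    · have hcl : k < (t - prev) * ((rest.length : Int) + 1) := not_le.1 hc
      have hprevt : prev < t := by
        rcases eq_or_lt_of_le hhead with hEq | h2
        · exfalso
          apply hc
          rw [← hEq]
          simpa using hk
        · exact h2
      have hstop : bulkB ((t, i) :: rest) k prev = ((t, i) :: rest, k, prev) := by
        simp only [bulkB, if_neg hc]
      refine ⟨by rw [hstop]; simp, ?_⟩
      have hallpos : ∀ q ∈ (t, i) :: rest, prev < q.1 := by
        intro q hq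
        rcases List.mem_cons.1 hq with rfl | hq'
        · exact hprevt
        · have := htail q hq'
          omega
      rw [shiftF_eq_mapSub prev _ hallpos]
      have hlenm : (mapSub prev ((t, i) :: rest)).length = rest.length + 1 := by simp [mapSub]
      have hmpos : 0 < rest.length + 1 := by omega
      rw [sim2_rounds (mapSub prev ((t, i) :: rest)) k
        (by simp [mapSub]) hk
        (by
          intro q hq
          rw [mapSub, List.mem_map] at hq
          obtain ⟨q0, hq0, rfl⟩ := hq
          have hge : t ≤ q0.1 := by
            rcases List.mem_cons.1 hq0 with rfl | hq0'
            · exact le_refl _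
            · exact htail q0 hq0'
          rw [hlenm]
          have : (t - prev) * ((rest.length : Int) + 1) ≤ (q0.1 - prev) * ((rest.length : Int) + 1) := by
            apply mul_le_mul_of_nonneg_right (by omega) (by positivity)
          simp only []
          push_cast
          linarith)
        (by rw [snd_mapSub]; exact hnod)]
      simp only [bulkOut, hstop]
      rw [sortSnd_mapSub prev _ hnod]
      have hmod_lt : (PySem.Int.mod k ((mapSub prev ((t, i) :: rest)).length : Int)).toNat <
          ((t, i) :: rest).length := by
        rw [hlenm]
        have h1 := PySem.Int.mod_lt k (b := ((rest.length : Int) + 1)) (by positivity)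
        have h2 := PySem.Int.mod_nonneg k (b := ((rest.length : Int) + 1)) (by positivity)
        simp only [List.length_cons]
        push_cast
        omega
      have hmodeq : (PySem.Int.mod k ((mapSub prev ((t, i) :: rest)).length : Int)) =
          (PySem.Int.mod k ((((t, i) :: rest).length : Nat) : Int)) := by
        rw [hlenm]
        simp
      have hmod_lt2 : (PySem.Int.mod k ((((t, i) :: rest).length : Nat) : Int)).toNat <
          ((t, i) :: rest).length := by
        rw [← hmodeq]
        exact hmod_lt
      rw [hmodeq]
      rw [List.getD_eq_getElem _ _ (by
          simp only [length_mapSub, length_sortSnd]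
          exact hmod_lt2),
        List.getD_eq_getElem _ _ (by
          simp only [length_sortSnd]
          exact hmod_lt2)]
      simp only [mapSub, List.getElem_map]

theorem sorted2_eq_sorted_lex (xs : List (Int × Int)) :
    PySem.List.sorted2 xs Prod.fst Prod.snd false =
      PySem.List.sorted xs (fun p => toLex p) false := by
  simp only [PySem.List.sorted2, PySem.List.sorted]
  norm_num
  have hcomp : (fun a b : Int × Int => decide (a.1 < b.1) || (!decide (b.1 < a.1) && decide (a.2 < b.2))) =
      (fun a b : Int × Int => decide ((toLex a : Lex (Int × Int)) < toLex b)) := by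
    funext a b
    by_cases h1 : a.1 < b.1 <;> by_cases h2 : b.1 < a.1 <;> by_cases h3 : a.2 < b.2 <;>
      simp [h1, h2, h3, Prod.Lex.lt_iff] <;> omega
  rw [hcomp]

theorem items_pairwise_lexLt (xs : List (Int × Int)) (hn : (xs.map Prod.snd).Nodup) :
    (PySem.List.sorted2 xs Prod.fst Prod.snd false).Pairwise lexLt := by
  rw [sorted2_eq_sorted_lex]
  have hle := PySem.List.sorted_pairwise xs (fun p => (toLex p : Lex (Int × Int)))
  have hperm : (PySem.List.sorted xs (fun p => (toLex p : Lex (Int × Int))) false).Perm xs :=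
    PySem.List.sorted_perm _ _ _
  have hnods := (hperm.map Prod.snd).nodup_iff.2 hn
  rw [List.Nodup, List.pairwise_map] at hnods
  refine (hle.and hnods).imp ?_
  rintro ⟨a, b⟩ ⟨c, d⟩ ⟨h1, h2⟩
  rcases Prod.Lex.le_iff.1 h1 with h | ⟨h3, h4⟩
  · exact Or.inl h
  · exact Or.inr ⟨h3, lt_of_le_of_ne h4 h2⟩

theorem solution_alt_eq_sim2 (ft : List Int) (k : Int) (h : ∀ x ∈ ft, 0 ≤ x) :
    solution_alt ft k = sim2 (pairsB ft) (max k 0) := by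
  simp only [solution_alt]
  set k' := max k 0 with hk'
  have hk : 0 ≤ k' := le_max_right _ _
  clear_value k'
  clear hk'
  have hpos : ∀ p ∈ pairsB ft, 0 < p.1 := by
    rw [pairsB_eq_pairsF]
    exact pairsF_fst_pos 0 ft
  have htot : (ft.filter (fun t => 0 < t)).sum = ((pairsB ft).map (fun p => p.1)).sum := by
    rw [pairsB_eq_pairsF]
    exact sum_filter_pairsF 0 ft
  by_cases hk2 : (ft.filter (fun t => 0 < t)).sum ≤ k'
  · rw [if_pos hk2]
    rw [sim2_all_eaten (pairsB ft) k' hpos (by omega)]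
  · rw [if_neg hk2]
    set items := PySem.List.sorted2 (pairsB ft) Prod.fst Prod.snd with hitems
    have hperm : items.Perm (pairsB ft) := PySem.List.sorted2_perm _ _ _ _
    have hnodB : ((pairsB ft).map Prod.snd).Nodup := by
      apply snd_nodup_of_pairwise
      rw [pairsB_eq_pairsF]
      exact pairsF_snd_pairwise 0 ft
    have hnodI : (items.map Prod.snd).Nodup := (hperm.map Prod.snd).nodup_iff.2 hnodB
    have hpw : items.Pairwise lexLt := items_pairwise_lexLt _ hnodB
    have hposI : ∀ p ∈ items, 0 < p.1 := fun p hp => hpos p (hperm.mem_iff.1 hp)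
    have hsum : sumSub 0 items = (ft.filter (fun t => 0 < t)).sum := by
      rw [sumSub]
      simp only [sub_zero]
      rw [(hperm.map (fun p : Int × Int => p.1)).sum_eq, htot]
    obtain ⟨hne, hsim⟩ := bulk_correct items k' 0 hk hpw
      (fun p hp => le_of_lt (hposI p hp)) hnodI (by omega)
    rw [shiftF_zero_of_pos items hposI] at hsim
    have hlink : sim2 (pairsB ft) k' = sim2 items k' := sim2_perm (pairsB ft) k' items hperm.symm hnodB
    rw [hlink, hsim]
    -- identify the port's final expression with bulkOut
    simp only [bulkOut]
    have hlen0 : 0 < (bulkB items k' 0).1.length := List.length_pos_of_ne_nil hne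
    have hlenr : (PySem.List.sorted (bulkB items k' 0).1 (fun p => p.2) false).length =
        (bulkB items k' 0).1.length := PySem.List.length_sorted _ _ _
    have hmn := PySem.Int.mod_nonneg (bulkB items k' 0).2.1
      (b := ((bulkB items k' 0).1.length : Int)) (by exact_mod_cast hlen0)
    have hml := PySem.Int.mod_lt (bulkB items k' 0).2.1
      (b := ((bulkB items k' 0).1.length : Int)) (by exact_mod_cast hlen0)
    rw [hlenr]
    rw [PySem.List.pyGetD_eq_getElem _ _ hmn (by rw [hlenr]; exact_mod_cast hml)]
    rw [List.getD_eq_getElem _ _ (by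
      rw [show (sortSnd (bulkB items k' 0).1).length = (bulkB items k' 0).1.length from
        PySem.List.length_sorted _ _ _]
      omega)]
    rfl

-- ===== VERDICT (by name: the statement is the Claim_ definition above) =====
theorem solution_spec : Claim_equal_solution := by
  unfold Claim_equal_solution
  intro ft k _ hpre
  unfold Spec_solution
  rw [solution_eq_sim2 ft k hpre, solution_alt_eq_sim2 ft k hpre]
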